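-- pv_equiv track=rewrite | github.com/davidkogan/MatchingMarket | matching_market.py | get_faves
-- ===== SOURCE A (Python) =====
-- import collections
--
-- def get_faves(n, values):
--     favorites = collections.defaultdict(list)
--     for i in range(n):
--         maxval = max(values[i])
--         for j in range(n):
--             if values[i][j] == maxval:
--                 favorites[i + 1].append(j + 1)
--     return favorites
-- ===== SOURCE B (Python) =====
-- import collections
--
-- def get_faves(n, values):
--     # One pass per row: running max with argmax-index reset, then keep indices within the first n columns.
--     favorites = collections.defaultdict(list)
--     for i in range(n):
--         best = None
--         idxs = []
--         for j, v in enumerate(values[i]):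
--             if best is None or v > best:
--                 best = v
--                 idxs = [j + 1]
--             elif v == best:
--                 idxs.append(j + 1)
--         picks = [j for j in idxs if j <= n]
--         if picks:
--             favorites[i + 1] = picks
--     return favorites
-- ===== Notes on version B (the rewrite author's own statement) =====
-- stated objective: alternative
-- what changed: Replaces A's two passes per row (builtin max, then an index scan over range(n)) with a single enumerate pass maintaining a running max and an argmax-index list reset on a new max, filtered to the first n columns; rows with no in-range argmax never create a key, as in A.
import Mathlib
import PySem

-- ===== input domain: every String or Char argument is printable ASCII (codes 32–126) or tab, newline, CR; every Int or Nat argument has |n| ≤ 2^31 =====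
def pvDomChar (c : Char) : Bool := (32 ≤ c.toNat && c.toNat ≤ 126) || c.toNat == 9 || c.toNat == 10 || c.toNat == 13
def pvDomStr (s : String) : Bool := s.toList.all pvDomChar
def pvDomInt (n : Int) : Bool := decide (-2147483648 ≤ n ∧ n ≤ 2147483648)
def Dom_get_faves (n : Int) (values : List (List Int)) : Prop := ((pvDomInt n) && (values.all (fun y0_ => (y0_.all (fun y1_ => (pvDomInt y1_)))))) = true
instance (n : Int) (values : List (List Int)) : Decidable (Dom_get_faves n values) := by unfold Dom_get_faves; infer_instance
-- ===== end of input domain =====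

-- B replaces A's two passes per row (builtin max, then an index scan) by one running-max
-- pass with argmax-index reset, filtered to the first n columns (objective: alternative).

-- ===== PORT A =====
-- Literal port of A. '.getD' defaults stand where Python raises (IndexError / ValueError
-- on max of an empty row); Pre_get_faves excludes exactly those inputs.
def get_faves (n : Int) (values : List (List Int)) : List (Int × List Int) :=
  ((PySem.List.pyRange 0 n 1).foldl (fun fav i =>
      let row := (PySem.List.pyGet? values i).getD []
      let maxval := (PySem.List.max? row (fun v => v)).getD 0
      (PySem.List.pyRange 0 n 1).foldl (fun f j =>
        if PySem.List.pyGetD row j 0 = maxval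
        then f.modify (i + 1) [] (fun l => l ++ [j + 1]) else f) fav)
    PySem.Dict.empty).items

-- ===== PORT B =====
-- running max + argmax indices for one row: (best, idxs) as in Source B's inner loop
def bestIdxs (row : List Int) : Option Int × List Int :=
  (PySem.List.enumerate row).foldl (fun st p =>
    match st.1 with
    | none => (some p.2, [p.1 + 1])
    | some b =>
      if b < p.2 then (some p.2, [p.1 + 1])
      else if p.2 = b then (st.1, st.2 ++ [p.1 + 1]) else st)
    (none, [])

def get_faves_alt (n : Int) (values : List (List Int)) : List (Int × List Int) :=
  ((PySem.List.pyRange 0 n 1).foldl (fun fav i =>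
      let row := (PySem.List.pyGet? values i).getD []
      let picks := (bestIdxs row).2.filter (fun j => decide (j ≤ n))
      if picks = [] then fav else fav.insert (i + 1) picks)
    PySem.Dict.empty).items

-- ===== PRECONDITION & SPEC =====
-- A raises IndexError when n exceeds the number of rows or a scanned row's length, and
-- ValueError on max() of an empty scanned row; Pre_ excludes exactly those inputs.
def Pre_get_faves (n : Int) (values : List (List Int)) : Prop :=
  n ≤ (values.length : Int) ∧ ∀ row ∈ values.take n.toNat, n ≤ (row.length : Int)
instance (n : Int) (values : List (List Int)) : Decidable (Pre_get_faves n values) := by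
  unfold Pre_get_faves; infer_instance
def pvWitness_get_faves : Int × List (List Int) := (2, [[1, 2], [3, 3]])

def Spec_get_faves (n : Int) (values : List (List Int)) (out : List (Int × List Int)) : Prop :=
  out = get_faves_alt n values
instance (n : Int) (values : List (List Int)) (out : List (Int × List Int)) : Decidable (Spec_get_faves n values out) := by unfold Spec_get_faves; infer_instance

-- ===== CLAIM (what is proved, stated in full; the proofs are below) =====
def Claim_equal_get_faves : Prop := ∀ (n : Int) (values : List (List Int)), Dom_get_faves n values → Pre_get_faves n values → Spec_get_faves n values (get_faves n values)
-- ===== LEMMAS AND PROOFS =====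

-- A's per-row match list: 1-based indices j+1, j < n, with row[j] equal to A's maxval
def rowL (n : Int) (values : List (List Int)) (i : Int) : List Int :=
  let row := (PySem.List.pyGet? values i).getD []
  let maxval := (PySem.List.max? row (fun v => v)).getD 0
  ((PySem.List.pyRange 0 n 1).filter (fun j => decide (PySem.List.pyGetD row j 0 = maxval))).map (· + 1)

-- B's per-row pick list
def picksB (n : Int) (values : List (List Int)) (i : Int) : List Int :=
  ((bestIdxs ((PySem.List.pyGet? values i).getD [])).2).filter (fun j => decide (j ≤ n))

-- shared shape of both output association lists
def specOf (L : Int → List Int) (m : Nat) : List (Int × List Int) :=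
  ((PySem.List.pyRange 0 (m : Int) 1).filter (fun i => decide (L i ≠ []))).map (fun i => (i + 1, L i))

lemma get?_mk_end (S : List (Int × List Int)) (k : Int) (acc : List Int)
    (hk : k ∉ S.map (·.1)) :
    (PySem.Dict.mk (S ++ [(k, acc)])).get? k = some acc := by
  induction S with
  | nil => simp [PySem.Dict.get?_mk_cons]
  | cons p t ih =>
    simp only [List.map_cons, List.mem_cons, not_or] at hk
    rw [List.cons_append, PySem.Dict.get?_mk_cons]
    simp only [beq_iff_eq]
    rw [if_neg (Ne.symm hk.1)]
    exact ih hk.2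

lemma modify_end (S : List (Int × List Int)) (k : Int) (acc : List Int) (f : List Int → List Int)
    (hk : k ∉ S.map (·.1)) :
    (PySem.Dict.mk (S ++ [(k, acc)])).modify k [] f = PySem.Dict.mk (S ++ [(k, f acc)]) := by
  have hget := get?_mk_end S k acc hk
  have hcont : (PySem.Dict.mk (S ++ [(k, acc)])).contains k = true := by
    rw [PySem.Dict.contains_eq_isSome_get?, hget]; rfl
  simp only [PySem.Dict.modify, PySem.Dict.getD_eq_get?_getD, hget, Option.getD_some,
    PySem.Dict.insert, hcont, if_pos]
  congr 1
  simp only [List.map_append]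
  congr 1
  · refine List.map_congr_left ?_ |>.trans (List.map_id _)
    intro p hp
    have : p.1 ≠ k := fun h => hk (h ▸ List.mem_map_of_mem hp)
    simp [this]
  · simp

lemma modify_fresh (d : PySem.Dict Int (List Int)) (k : Int) (f : List Int → List Int)
    (hk : d.contains k = false) :
    d.modify k [] f = PySem.Dict.mk (d.items ++ [(k, f [])]) := by
  apply PySem.Dict.ext
  simp only [PySem.Dict.modify, PySem.Dict.getD_of_not_contains _ _ hk]
  rw [PySem.Dict.items_insert_of_not_contains _ _ hk]

lemma innerA_aux (js : List Int) (c : Int → Prop) [DecidablePred c] (k : Int)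
    (S : List (Int × List Int)) (acc : List Int) (hk : k ∉ S.map (·.1)) :
    js.foldl (fun f j => if c j then f.modify k [] (fun l => l ++ [j + 1]) else f)
        (PySem.Dict.mk (S ++ [(k, acc)]))
      = PySem.Dict.mk (S ++ [(k, acc ++ (js.filter (fun j => decide (c j))).map (· + 1))]) := by
  induction js generalizing acc with
  | nil => simp
  | cons j t ih =>
    by_cases hc : c j
    · simp only [List.foldl_cons, List.filter_cons, hc, decide_true, if_true,
        modify_end S k acc _ hk, ih (acc ++ [j + 1])]
      simp
    · simp only [List.foldl_cons, List.filter_cons, hc, decide_false, if_false,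
        ih acc]
      simp

lemma innerA (js : List Int) (c : Int → Prop) [DecidablePred c] (k : Int)
    (d : PySem.Dict Int (List Int)) (hk : k ∉ d.keys) :
    js.foldl (fun f j => if c j then f.modify k [] (fun l => l ++ [j + 1]) else f) d
      = PySem.Dict.mk (d.items ++
          (if (js.filter (fun j => decide (c j))) = [] then []
           else [(k, (js.filter (fun j => decide (c j))).map (· + 1))])) := by
  have hcont : d.contains k = false := by
    rw [PySem.Dict.contains_eq_decide_mem_keys]
    simpa using hk
  have hkeys : k ∉ d.items.map (·.1) := by
    have : d.keys = d.items.map (·.1) := by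
      obtain ⟨S⟩ := d
      simp [PySem.Dict.keys_mk]
    rwa [this] at hk
  induction js with
  | nil =>
    apply PySem.Dict.ext
    simp
  | cons j t ih =>
    by_cases hc : c j
    · simp only [List.foldl_cons, List.filter_cons, hc, decide_true, if_true,
        modify_fresh d k _ hcont, List.nil_append]
      rw [innerA_aux t c k d.items [j + 1] hkeys]
      simp
    · simp only [List.foldl_cons, List.filter_cons, hc, decide_false, if_false, ih]
      simp

lemma keys_spec_lt (L : Int → List Int) (m : Nat) :
    ∀ x ∈ (specOf L m).map (·.1), x < (m : Int) + 1 := by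
  intro x hx
  simp only [specOf, List.map_map, List.mem_map, Function.comp, List.mem_filter,
    PySem.List.mem_pyRange_one] at hx
  obtain ⟨i, ⟨⟨_, hi⟩, _⟩, rfl⟩ := hx
  omega

lemma spec_succ (L : Int → List Int) (m : Nat) :
    specOf L (m + 1) = specOf L m ++ (if L (m : Int) = [] then [] else [((m : Int) + 1, L (m : Int))]) := by
  unfold specOf
  have hcast : ((m + 1 : Nat) : Int) = (m : Int) + 1 := by push_cast; ring
  rw [hcast, PySem.List.pyRange_one_succ_right (by positivity), List.filter_append,
    List.map_append]
  congr 1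
  by_cases h : L (m : Int) = [] <;> simp [h]

lemma A_outer (n : Int) (values : List (List Int)) : ∀ m : Nat,
    (PySem.List.pyRange 0 (m : Int) 1).foldl (fun fav i =>
        let row := (PySem.List.pyGet? values i).getD []
        let maxval := (PySem.List.max? row (fun v => v)).getD 0
        (PySem.List.pyRange 0 n 1).foldl (fun f j =>
          if PySem.List.pyGetD row j 0 = maxval
          then f.modify (i + 1) [] (fun l => l ++ [j + 1]) else f) fav)
      PySem.Dict.empty
     = PySem.Dict.mk (specOf (rowL n values) m) := by
  intro m
  induction m with
  | zero =>
    have h0 : PySem.List.pyRange 0 ((0 : Nat) : Int) 1 = [] :=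
      PySem.List.pyRange_one_eq_nil (by norm_num)
    rw [h0]
    unfold specOf
    rw [h0]
    rfl
  | succ m ih =>
    have hcast : ((m + 1 : Nat) : Int) = (m : Int) + 1 := by push_cast; ring
    rw [hcast, PySem.List.pyRange_one_succ_right (by positivity), List.foldl_append, ih,
      List.foldl_cons, List.foldl_nil]
    have hk : ((m : Int) + 1) ∉ (PySem.Dict.mk (specOf (rowL n values) m)).keys := by
      rw [PySem.Dict.keys_mk]
      intro h
      exact absurd (keys_spec_lt _ _ _ h) (by omega)
    rw [innerA _ _ _ _ hk, spec_succ]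
    congr 1
    congr 1
    have : rowL n values (m : Int) =
        ((PySem.List.pyRange 0 n 1).filter (fun j =>
          decide (PySem.List.pyGetD ((PySem.List.pyGet? values (m : Int)).getD []) j 0 =
            (PySem.List.max? ((PySem.List.pyGet? values (m : Int)).getD []) (fun v => v)).getD 0))).map (· + 1) := rfl
    rw [this]
    by_cases h : (PySem.List.pyRange 0 n 1).filter (fun j =>
        decide (PySem.List.pyGetD ((PySem.List.pyGet? values (m : Int)).getD []) j 0 =
          (PySem.List.max? ((PySem.List.pyGet? values (m : Int)).getD []) (fun v => v)).getD 0)) = []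
    · simp
    · simp [List.map_eq_nil_iff]

lemma B_outer (n : Int) (values : List (List Int)) : ∀ m : Nat,
    (PySem.List.pyRange 0 (m : Int) 1).foldl (fun fav i =>
        let row := (PySem.List.pyGet? values i).getD []
        let picks := (bestIdxs row).2.filter (fun j => decide (j ≤ n))
        if picks = [] then fav else fav.insert (i + 1) picks)
      PySem.Dict.empty
     = PySem.Dict.mk (specOf (picksB n values) m) := by
  intro m
  induction m with
  | zero =>
    have h0 : PySem.List.pyRange 0 ((0 : Nat) : Int) 1 = [] :=
      PySem.List.pyRange_one_eq_nil (by norm_num)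
    rw [h0]
    unfold specOf
    rw [h0]
    rfl
  | succ m ih =>
    have hcast : ((m + 1 : Nat) : Int) = (m : Int) + 1 := by push_cast; ring
    rw [hcast, PySem.List.pyRange_one_succ_right (by positivity), List.foldl_append, ih,
      List.foldl_cons, List.foldl_nil]
    rw [spec_succ]
    have hpicks : picksB n values (m : Int) =
        (bestIdxs ((PySem.List.pyGet? values (m : Int)).getD [])).2.filter
          (fun j => decide (j ≤ n)) := rfl
    by_cases h : (bestIdxs ((PySem.List.pyGet? values (m : Int)).getD [])).2.filter
        (fun j => decide (j ≤ n)) = []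
    · have hp0 : picksB n values (m : Int) = [] := by rw [hpicks]; exact h
      simp only [h, hp0]
      simp
    · simp only [h, if_false]
      apply PySem.Dict.ext
      have hcont : (PySem.Dict.mk (specOf (picksB n values) m)).contains ((m : Int) + 1) = false := by
        rw [PySem.Dict.contains_eq_decide_mem_keys, PySem.Dict.keys_mk]
        simp only [decide_eq_false_iff_not]
        intro hmem
        exact absurd (keys_spec_lt _ _ _ hmem) (by omega)
      rw [PySem.Dict.items_insert_of_not_contains _ _ hcont]
      rw [if_neg (by rw [hpicks]; exact h), hpicks]

lemma step_cons (s v b : Int) (acc : List Int) (rest : List (Int × Int)) :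
    (((s, v) :: rest).foldl (fun (st : Option Int × List Int) (p : Int × Int) =>
        match st.1 with
        | none => (some p.2, [p.1 + 1])
        | some b =>
          if b < p.2 then (some p.2, [p.1 + 1])
          else if p.2 = b then (st.1, st.2 ++ [p.1 + 1]) else st)
      (some b, acc))
    = rest.foldl (fun (st : Option Int × List Int) (p : Int × Int) =>
        match st.1 with
        | none => (some p.2, [p.1 + 1])
        | some b =>
          if b < p.2 then (some p.2, [p.1 + 1])
          else if p.2 = b then (st.1, st.2 ++ [p.1 + 1]) else st)
      (if b < v then (some v, [s + 1]) else if v = b then (some b, acc ++ [s + 1]) else (some b, acc)) := by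
  rfl

lemma bestIdxs_aux (t : List Int) : ∀ (s b : Int) (acc : List Int),
    (PySem.List.enumerate t s).foldl (fun st p =>
        match st.1 with
        | none => (some p.2, [p.1 + 1])
        | some b =>
          if b < p.2 then (some p.2, [p.1 + 1])
          else if p.2 = b then (st.1, st.2 ++ [p.1 + 1]) else st)
      (some b, acc)
    = (some (t.foldl max b),
       (if t.foldl max b = b then acc else []) ++
         ((PySem.List.enumerate t s).filter (fun p => decide (p.2 = t.foldl max b))).map (fun p => p.1 + 1)) := by
  induction t with
  | nil => intro s b acc; simp [PySem.List.enumerate_nil]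
  | cons v t ih =>
    intro s b acc
    rw [PySem.List.enumerate_cons, step_cons, List.filter_cons,
      show List.foldl max b (v :: t) = List.foldl max (max b v) t from rfl]
    rcases lt_trichotomy b v with hbv | hbv | hbv
    · have hmax : max b v = v := max_eq_right hbv.le
      have hM := (PySem.List.le_foldl_max t v).1
      rw [if_pos hbv, hmax, ih (s + 1) v [s + 1]]
      rw [if_neg (by omega : ¬ List.foldl max v t = b)]
      by_cases hv : List.foldl max v t = v
      · rw [if_pos hv, if_pos (decide_eq_true hv.symm), List.map_cons,
          List.singleton_append, List.nil_append]
      · rw [if_neg hv, if_neg (by simpa using fun h => hv h.symm)]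
    · subst hbv
      rw [if_neg (lt_irrefl b), if_pos rfl, max_self, ih (s + 1) b (acc ++ [s + 1])]
      by_cases hb : List.foldl max b t = b
      · rw [if_pos hb, if_pos hb, if_pos (decide_eq_true hb.symm), List.map_cons,
          List.append_assoc, List.singleton_append]
      · rw [if_neg hb, if_neg hb, if_neg (by simpa using fun h => hb h.symm)]
    · have hmax : max b v = b := max_eq_left hbv.le
      have hM := (PySem.List.le_foldl_max t b).1
      rw [if_neg (by omega : ¬ b < v), if_neg (by omega : ¬ v = b), hmax,
        ih (s + 1) b acc]
      rw [if_neg (show ¬ ((fun p : Int × Int => decide (p.2 = List.foldl max b t)) (s, v) = true) from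
        by simp; omega)]

lemma bestIdxs_cons (v : Int) (t : List Int) :
    bestIdxs (v :: t)
      = (some (t.foldl max v),
         ((PySem.List.enumerate (v :: t)).filter
             (fun p => decide (p.2 = t.foldl max v))).map (fun p => p.1 + 1)) := by
  refine (bestIdxs_aux t 1 v [1] : bestIdxs (v :: t) = _).trans ?_
  rw [show PySem.List.enumerate (v :: t) = ((0 : Int), v) :: PySem.List.enumerate t 1 by
    rw [PySem.List.enumerate_cons]; norm_num]
  rw [List.filter_cons]
  by_cases hv : List.foldl max v t = v
  · rw [if_pos hv, if_pos (decide_eq_true hv.symm), List.map_cons, List.singleton_append]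
    rfl
  · rw [if_neg hv, if_neg (by simpa using fun h => hv h.symm), List.nil_append]

lemma row_eq (n : Int) (row : List Int) (hn : 1 ≤ n) (hlen : n ≤ (row.length : Int)) :
    (bestIdxs row).2.filter (fun j => decide (j ≤ n))
      = ((PySem.List.pyRange 0 n 1).filter
          (fun j => decide (PySem.List.pyGetD row j 0 = (PySem.List.max? row (fun v => v)).getD 0))).map (· + 1) := by
  rcases row with _ | ⟨v, t⟩
  · exfalso; simp at hlen; omega
  · rw [bestIdxs_cons, PySem.List.max?_id_cons]
    simp only [Option.getD_some]
    rw [PySem.List.enumerate_eq_map_pyRange (v :: t) 0, List.filter_map, List.filter_filter,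
      List.filter_map, List.map_map]
    have hsplit : PySem.List.pyRange 0 (PySem.List.len (v :: t)) 1
        = PySem.List.pyRange 0 n 1 ++ PySem.List.pyRange n (PySem.List.len (v :: t)) 1 := by
      rw [PySem.List.len_eq]
      exact PySem.List.pyRange_one_append 0 n _ (by omega) (by exact_mod_cast hlen)
    rw [hsplit, List.filter_append, List.map_append]
    have h2 : (PySem.List.pyRange n (PySem.List.len (v :: t)) 1).filter
        ((fun a => ((fun j => decide (j ≤ n)) ∘ fun p => p.1 + 1) a && decide (a.2 = List.foldl max v t)) ∘ fun j =>
            (j, PySem.List.pyGetD (v :: t) j 0)) = [] := by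
      apply List.filter_eq_nil_iff.mpr
      intro j hj
      rw [PySem.List.len_eq] at hj
      have hjm := PySem.List.mem_pyRange_one.mp hj
      simp only [Function.comp_apply, Bool.and_eq_true, decide_eq_true_eq, not_and]
      intro h
      omega
    rw [h2, List.map_nil, List.append_nil]
    have h1 : (PySem.List.pyRange 0 n 1).filter
        ((fun a => ((fun j => decide (j ≤ n)) ∘ fun p => p.1 + 1) a && decide (a.2 = List.foldl max v t)) ∘ fun j =>
            (j, PySem.List.pyGetD (v :: t) j 0))
        = (PySem.List.pyRange 0 n 1).filter
            (fun j => decide (PySem.List.pyGetD (v :: t) j 0 = List.foldl max v t)) := by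
      apply List.filter_congr
      intro j hj
      have hjm := PySem.List.mem_pyRange_one.mp hj
      simp only [Function.comp_apply]
      by_cases h : PySem.List.pyGetD (v :: t) j 0 = List.foldl max v t
      · simp [h]; omega
      · simp [h]
    rw [h1]
    apply List.map_congr_left
    intro j hj
    simp

lemma specOf_congr (L1 L2 : Int → List Int) (m : Nat)
    (h : ∀ i ∈ PySem.List.pyRange 0 (m : Int) 1, L1 i = L2 i) :
    specOf L1 m = specOf L2 m := by
  unfold specOf
  rw [List.filter_congr (fun i hi => by rw [h i hi])]
  apply List.map_congr_left
  intro i hi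
  rw [h i (List.mem_of_mem_filter hi)]

-- ===== VERDICT (by name: the statement is the Claim_ definition above) =====
theorem get_faves_spec : Claim_equal_get_faves := by
  intro n values _ hPre
  unfold Spec_get_faves get_faves get_faves_alt
  by_cases hn : n ≤ 0
  · rw [PySem.List.pyRange_one_eq_nil hn]
    rfl
  · replace hn : 0 < n := by omega
    obtain ⟨m, rfl⟩ : ∃ m : Nat, (m : Int) = n := ⟨n.toNat, Int.toNat_of_nonneg hn.le⟩
    rw [A_outer _ values m, B_outer _ values m]
    show specOf (rowL ((m : Nat) : Int) values) m = specOf (picksB ((m : Nat) : Int) values) m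
    apply specOf_congr
    intro i hi
    obtain ⟨hi0, him⟩ := PySem.List.mem_pyRange_one.mp hi
    have hilen : i < (values.length : Int) := lt_of_lt_of_le him hPre.1
    have hrow : (PySem.List.pyGet? values i).getD [] = values[i.toNat] := by
      rw [PySem.List.pyGet?_eq_some_getElem values hi0 hilen]; rfl
    have hmem : values[i.toNat] ∈ values.take (m : Int).toNat := by
      have hlt : i.toNat < ((m : Int).toNat) ⊓ values.length := by omega
      have : (values.take (m : Int).toNat)[i.toNat]'(by simpa using hlt) = values[i.toNat] :=
        List.getElem_take
      rw [← this]
      exact List.getElem_mem _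
    have hlen : (m : Int) ≤ (values[i.toNat].length : Int) := hPre.2 _ hmem
    unfold rowL picksB
    rw [hrow]
    exact (row_eq (m : Int) values[i.toNat] (by omega) hlen).symm
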